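-- pv_equiv track=rewrite | github.com/ShivamAgarwal-code/May-Challenge_Angelhack | 18-05-2023/18-05-2023.py | calculate_lifeform_score
-- ===== SOURCE A (Python) =====
-- def calculate_lifeform_score(grid):
--     score = 0
--     rows = len(grid)
--     cols = len(grid[0])
--
--     for row in range(rows):
--         for col in range(cols):
--             if grid[row][col] == 'X':
--                 tile_number = row * cols + col
--                 score += 2 ** tile_number
--
--     return score
-- ===== SOURCE B (Python) =====
-- def calculate_lifeform_score(grid):
--     # Horner evaluation: walk the cells from the highest tile number down,
--     # doubling the accumulator instead of computing per-cell powers of two.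
--     cols = len(grid[0])
--     score = 0
--     for row in reversed(grid):
--         for cell in reversed(row[:cols]):
--             score = score * 2 + (1 if cell == 'X' else 0)
--     return score
-- ===== Notes on version B (the rewrite author's own statement) =====
-- stated objective: alternative
-- what changed: Replaces per-cell power computation (2 ** (row*cols+col)) with a Horner-style scan over the cells in reverse order that only doubles an accumulator and adds a bit.
import Mathlib
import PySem

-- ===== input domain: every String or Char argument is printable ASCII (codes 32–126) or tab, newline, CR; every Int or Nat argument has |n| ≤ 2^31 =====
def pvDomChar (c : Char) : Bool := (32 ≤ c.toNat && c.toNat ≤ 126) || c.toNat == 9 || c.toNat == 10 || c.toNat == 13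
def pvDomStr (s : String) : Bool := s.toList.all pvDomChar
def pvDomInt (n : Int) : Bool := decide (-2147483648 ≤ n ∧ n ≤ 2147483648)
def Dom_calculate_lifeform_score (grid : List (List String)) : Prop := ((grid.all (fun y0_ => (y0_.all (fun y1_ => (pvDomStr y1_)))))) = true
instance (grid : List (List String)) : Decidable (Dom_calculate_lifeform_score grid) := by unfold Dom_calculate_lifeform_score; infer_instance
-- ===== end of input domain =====

-- B replaces A's per-cell power 2**(row*cols+col) by a reverse Horner scan (double-and-add); equivalence is about the return value.

-- ===== PORT A =====
def calculate_lifeform_score (grid : List (List String)) : Int :=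
  let rows : Int := grid.length
  let cols : Int := (PySem.List.pyGetD grid 0 []).length
  (PySem.List.pyRange 0 rows 1).foldl (fun score row =>
    (PySem.List.pyRange 0 cols 1).foldl (fun score col =>
      if PySem.List.pyGetD (PySem.List.pyGetD grid row []) col "" = "X" then
        score + 2 ^ (row * cols + col).toNat
      else score) score) 0

-- ===== PORT B =====
def calculate_lifeform_score_alt (grid : List (List String)) : Int :=
  let cols : Int := (PySem.List.pyGetD grid 0 []).length
  grid.reverse.foldl (fun score row =>
    (PySem.List.slice row none (some cols)).reverse.foldl
      (fun score cell => score * 2 + (if cell = "X" then 1 else 0)) score) 0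

-- ===== PRECONDITION & SPEC =====
-- Pre_ excludes exactly the inputs on which A raises IndexError: the empty grid (grid[0])
-- and ragged grids with a row shorter than the first row (grid[row][col]).
def Pre_calculate_lifeform_score (grid : List (List String)) : Prop :=
  grid ≠ [] ∧ ∀ r ∈ grid, (PySem.List.pyGetD grid 0 []).length ≤ r.length
instance (grid : List (List String)) : Decidable (Pre_calculate_lifeform_score grid) := by
  unfold Pre_calculate_lifeform_score; infer_instance

def pvWitness_calculate_lifeform_score : List (List String) := [["X", "."], [".", "X"]]

def Spec_calculate_lifeform_score (grid : List (List String)) (out : Int) : Prop := out = calculate_lifeform_score_alt grid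
instance (grid : List (List String)) (out : Int) : Decidable (Spec_calculate_lifeform_score grid out) := by unfold Spec_calculate_lifeform_score; infer_instance

-- ===== CLAIM (what is proved, stated in full; the proofs are below) =====
def Claim_equal_calculate_lifeform_score : Prop := ∀ (grid : List (List String)), Dom_calculate_lifeform_score grid → Pre_calculate_lifeform_score grid → Spec_calculate_lifeform_score grid (calculate_lifeform_score grid)

-- ===== LEMMAS AND PROOFS =====

-- bit value of one cell
def pvBit (c : String) : Int := if c = "X" then 1 else 0

-- value of a row of cells, cell i weighted 2^i
def pvVal (r : List String) : Int := r.foldr (fun c acc => pvBit c + 2 * acc) 0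

theorem pvVal_nil : pvVal [] = 0 := rfl
theorem pvVal_cons (c : String) (r : List String) : pvVal (c :: r) = pvBit c + 2 * pvVal r := rfl

theorem pvVal_append (l1 l2 : List String) :
    pvVal (l1 ++ l2) = pvVal l1 + 2 ^ l1.length * pvVal l2 := by
  induction l1 with
  | nil => simp [pvVal]
  | cons c l ih =>
      simp only [List.cons_append, pvVal_cons, ih, List.length_cons, pow_succ]
      ring

-- B's inner loop (a Horner foldr) in closed form
theorem pvHorner (l : List String) (s : Int) :
    l.foldr (fun c s => s * 2 + (if c = "X" then 1 else 0)) s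
      = s * 2 ^ l.length + pvVal l := by
  induction l with
  | nil => simp [pvVal]
  | cons c l ih =>
      simp only [List.foldr_cons, ih, pvVal_cons, List.length_cons, pow_succ, pvBit]
      ring

-- A's inner loop in closed form
theorem pvInnerA (c : Nat) (r : List String) (off s : Int) (hoff : 0 ≤ off)
    (hc : c ≤ r.length) :
    (PySem.List.pyRange 0 (c : Int) 1).foldl
      (fun s col => if PySem.List.pyGetD r col "" = "X" then s + 2 ^ (off + col).toNat else s) s
      = s + 2 ^ off.toNat * pvVal (r.take c) := by
  induction c generalizing s with
  | zero => simp [PySem.List.pyRange_one_eq_nil, pvVal]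
  | succ c ih =>
      have hc' : c ≤ r.length := Nat.le_of_succ_le hc
      have hlt : c < r.length := hc
      have hsplit : ((c + 1 : Nat) : Int) = (c : Int) + 1 := by push_cast; ring
      rw [hsplit, PySem.List.pyRange_one_succ_right (by positivity),
        List.foldl_append, ih s hc']
      have hget : PySem.List.pyGetD r (c : Int) "" = r[c] :=
        PySem.List.pyGetD_ofNat _ _ _ hlt
      have htake : r.take (c + 1) = r.take c ++ [r[c]] := by
        rw [List.take_add_one]; simp [List.getElem?_eq_getElem hlt]
      have hlen : (r.take c).length = c := List.length_take_of_le hc'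
      have hpow : (2 : Int) ^ (off + (c : Int)).toNat = 2 ^ off.toNat * 2 ^ c := by
        rw [← pow_add]
        congr 1
        omega
      simp only [List.foldl_cons, List.foldl_nil, hget, htake, pvVal_append, hlen,
        pvVal_cons, pvVal_nil, pvBit, hpow]
      split_ifs <;> ring

-- accumulator linearity of the B-side foldr over rows
theorem pvRowsFoldr (cols : Nat) (g : List (List String)) (s : Int) :
    g.foldr (fun r s => s * 2 ^ cols + pvVal (r.take cols)) s
      = g.foldr (fun r s => s * 2 ^ cols + pvVal (r.take cols)) 0
        + s * 2 ^ (cols * g.length) := by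
  induction g generalizing s with
  | nil => simp
  | cons r g ih =>
      simp only [List.foldr_cons, List.length_cons, Nat.mul_succ, pow_add]
      rw [ih s]
      ring

-- A's whole computation in closed form (right-append induction over the grid)
theorem pvOuterA (cols : Nat) (g : List (List String))
    (hg : ∀ r ∈ g, cols ≤ r.length) :
    (PySem.List.pyRange 0 (g.length : Int) 1).foldl
      (fun score row =>
        (PySem.List.pyRange 0 (cols : Int) 1).foldl
          (fun score col =>
            if PySem.List.pyGetD (PySem.List.pyGetD g row []) col "" = "X" then
              score + 2 ^ (row * (cols : Int) + col).toNat
            else score) score) 0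
      = g.foldr (fun r s => s * 2 ^ cols + pvVal (r.take cols)) 0 := by
  induction g using List.reverseRecOn with
  | nil => simp [PySem.List.pyRange_one_eq_nil]
  | append_singleton g r ih =>
      have hr : cols ≤ r.length := hg r (by simp)
      have hg' : ∀ r' ∈ g, cols ≤ r'.length := fun r' h => hg r' (by simp [h])
      have hlen : ((g ++ [r]).length : Int) = (g.length : Int) + 1 := by simp
      rw [hlen, PySem.List.pyRange_one_succ_right (by positivity), List.foldl_append]
      have hcong : (PySem.List.pyRange 0 (g.length : Int) 1).foldl
          (fun score row =>
            (PySem.List.pyRange 0 (cols : Int) 1).foldl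
              (fun score col =>
                if PySem.List.pyGetD (PySem.List.pyGetD (g ++ [r]) row []) col "" = "X" then
                  score + 2 ^ (row * (cols : Int) + col).toNat
                else score) score) (0 : Int)
          = (PySem.List.pyRange 0 (g.length : Int) 1).foldl
          (fun score row =>
            (PySem.List.pyRange 0 (cols : Int) 1).foldl
              (fun score col =>
                if PySem.List.pyGetD (PySem.List.pyGetD g row []) col "" = "X" then
                  score + 2 ^ (row * (cols : Int) + col).toNat
                else score) score) (0 : Int) := by
        apply PySem.List.foldl_congr_mem
        intro acc x hx
        have hx' := (PySem.List.mem_pyRange_one).1 hx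
        have hxx : PySem.List.pyGetD (g ++ [r]) x [] = PySem.List.pyGetD g x [] := by
          have h1 : x.toNat < g.length := by omega
          rw [PySem.List.pyGetD_eq_getElem _ _ (by omega) (by simp; omega),
            PySem.List.pyGetD_eq_getElem _ _ (by omega) (by omega)]
          exact List.getElem_append_left h1
        rw [hxx]
      rw [List.foldl_cons, List.foldl_nil, hcong, ih hg']
      have hgetr : PySem.List.pyGetD (g ++ [r]) (g.length : Int) [] = r := by
        rw [PySem.List.pyGetD_eq_getElem _ _ (by positivity) (by simp)]
        simp
      rw [hgetr]
      have := pvInnerA cols r ((g.length : Int) * (cols : Int))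
        (g.foldr (fun r s => s * 2 ^ cols + pvVal (r.take cols)) 0)
        (by positivity) hr
      simp only at this
      rw [this, List.foldr_append, List.foldr_cons, List.foldr_nil]
      have htn : ((g.length : Int) * (cols : Int)).toNat = cols * g.length := by
        simp [Int.toNat_mul]; ring
      rw [htn, pvRowsFoldr cols g (0 * 2 ^ cols + pvVal (r.take cols))]
      ring

-- B's whole computation in the same closed form
theorem pvB_fold (cols : Nat) (g : List (List String))
    (hg : ∀ r ∈ g, cols ≤ r.length) :
    g.reverse.foldl (fun score row =>
        (PySem.List.slice row none (some (cols : Int))).reverse.foldl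
          (fun score cell => score * 2 + (if cell = "X" then 1 else 0)) score) 0
      = g.foldr (fun r s => s * 2 ^ cols + pvVal (r.take cols)) 0 := by
  rw [List.foldl_reverse]
  induction g with
  | nil => rfl
  | cons r g ih =>
      have hr : cols ≤ r.length := hg r (by simp)
      simp only [List.foldr_cons, ih (fun r' h => hg r' (by simp [h]))]
      rw [PySem.List.slice_to_natCast, List.foldl_reverse, pvHorner,
        List.length_take_of_le hr]

-- ===== VERDICT (by name: the statement is the Claim_ definition above) =====
theorem calculate_lifeform_score_spec : Claim_equal_calculate_lifeform_score := by
  intro grid _ hpre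
  obtain ⟨hne, hrows⟩ := hpre
  unfold Spec_calculate_lifeform_score
  unfold calculate_lifeform_score calculate_lifeform_score_alt
  simp only []
  rw [pvB_fold (PySem.List.pyGetD grid 0 []).length grid hrows]
  exact pvOuterA (PySem.List.pyGetD grid 0 []).length grid hrows
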